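-- pv_equiv track=rewrite | github.com/ariffazil/openclaw-workspace | aaa_mcp/protocol/tool_graph.py | suggest_sequence
-- ===== SOURCE A (Python) =====
-- from typing import Dict, List, Optional
-- from typing import Dict, List, Optional, Set
--
-- WORKFLOW_SEQUENCES: Dict[str, List[str]] = {
--     "fact_check": ["init_gate", "reality_search", "agi_reason", "apex_verdict", "vault_seal"],
--     "safety_assessment": ["init_gate", "asi_empathize", "asi_align", "apex_verdict", "vault_seal"],
--     "full_analysis": [
--         "init_gate",
--         "agi_sense",
--         "reality_search",
--         "agi_think",
--         "agi_reason",
--         "asi_empathize",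
--         "asi_align",
--         "apex_verdict",
--         "vault_seal",
--     ],
--     "quick_decision": ["trinity_forge"],
--     "claim_verification": ["init_gate", "truth_audit", "vault_seal"],
--     "institutional_memory": ["vault_query"],
-- }
--
-- def suggest_sequence(intent: str, lane: str = "FACTUAL") -> List[str]:
--     """Suggest optimal tool sequence based on intent and lane."""
--     intent_lower = intent.lower()
--
--     # Intent matching
--     if any(k in intent_lower for k in ["fact", "check", "verify", "true", "false"]):
--         return WORKFLOW_SEQUENCES["fact_check"]
--
--     if any(k in intent_lower for k in ["safe", "harm", "risk", "impact", "stakeholder"]):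
--         return WORKFLOW_SEQUENCES["safety_assessment"]
--
--     if any(k in intent_lower for k in ["audit", "claims", "ai generated", "text"]):
--         return WORKFLOW_SEQUENCES["claim_verification"]
--
--     if any(k in intent_lower for k in ["past", "history", "previous", "query"]):
--         return WORKFLOW_SEQUENCES["institutional_memory"]
--
--     if any(k in intent_lower for k in ["quick", "fast", "simple"]):
--         return WORKFLOW_SEQUENCES["quick_decision"]
--
--     # Lane-based default
--     if lane == "FACTUAL":
--         return WORKFLOW_SEQUENCES["fact_check"]
--     elif lane in ["CARE", "SOCIAL"]:
--         return WORKFLOW_SEQUENCES["safety_assessment"]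
--     else:
--         return WORKFLOW_SEQUENCES["full_analysis"]
-- ===== SOURCE B (Python) =====
-- from typing import Dict, List
--
-- # Priority-indexed sequences: 0..4 are the keyword categories in priority order.
-- PRIORITY_SEQUENCES: List[List[str]] = [
--     ["init_gate", "reality_search", "agi_reason", "apex_verdict", "vault_seal"],   # 0 fact_check
--     ["init_gate", "asi_empathize", "asi_align", "apex_verdict", "vault_seal"],     # 1 safety_assessment
--     ["init_gate", "truth_audit", "vault_seal"],                                    # 2 claim_verification
--     ["vault_query"],                                                               # 3 institutional_memory
--     ["trinity_forge"],                                                             # 4 quick_decision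
-- ]
--
-- FULL_ANALYSIS: List[str] = [
--     "init_gate", "agi_sense", "reality_search", "agi_think", "agi_reason",
--     "asi_empathize", "asi_align", "apex_verdict", "vault_seal",
-- ]
--
-- # One flat keyword -> priority map (no rule ordering, no per-rule any()).
-- KEYWORD_PRIORITY: Dict[str, int] = {
--     "fact": 0, "check": 0, "verify": 0, "true": 0, "false": 0,
--     "safe": 1, "harm": 1, "risk": 1, "impact": 1, "stakeholder": 1,
--     "audit": 2, "claims": 2, "ai generated": 2, "text": 2,
--     "past": 3, "history": 3, "previous": 3, "query": 3,
-- }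
-- for kw in ("quick", "fast", "simple"):
--     KEYWORD_PRIORITY[kw] = 4
--
--
-- def suggest_sequence(intent: str, lane: str = "FACTUAL") -> List[str]:
--     """Min-reduction: best = smallest priority among all keywords occurring in intent."""
--     t = intent.lower()
--     best = 5
--     for kw, p in KEYWORD_PRIORITY.items():
--         if p < best and kw in t:
--             best = p
--     if best < 5:
--         return PRIORITY_SEQUENCES[best]
--     if lane == "FACTUAL":
--         return PRIORITY_SEQUENCES[0]
--     if lane in ("CARE", "SOCIAL"):
--         return PRIORITY_SEQUENCES[1]
--     return FULL_ANALYSIS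
-- ===== Notes on version B (the rewrite author's own statement) =====
-- stated objective: alternative
-- what changed: Replaces the ordered five-rule any()-and-early-return chain by a single min-reduction over one flat keyword->priority map (best matched priority indexes a priority-ordered sequence table); correct because the first rule that matches is exactly the minimum priority among all matching keywords.
import Mathlib
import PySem

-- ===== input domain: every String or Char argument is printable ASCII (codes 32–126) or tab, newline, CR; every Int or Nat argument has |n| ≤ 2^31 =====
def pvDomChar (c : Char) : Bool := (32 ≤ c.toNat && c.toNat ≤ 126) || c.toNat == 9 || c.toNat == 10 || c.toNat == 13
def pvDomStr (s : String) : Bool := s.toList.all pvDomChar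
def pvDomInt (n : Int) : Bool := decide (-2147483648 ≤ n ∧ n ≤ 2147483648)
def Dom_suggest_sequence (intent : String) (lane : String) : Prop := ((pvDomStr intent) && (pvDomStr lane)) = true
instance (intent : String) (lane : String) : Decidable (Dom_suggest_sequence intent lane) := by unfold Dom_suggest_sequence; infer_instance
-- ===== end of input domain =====

-- B replaces A's ordered five-rule any()-and-early-return chain by a single min-reduction over
-- one flat keyword->priority map, indexing a priority-ordered sequence table (objective: alternative).

-- ===== PORT A =====
-- A's WORKFLOW_SEQUENCES["…"] lookups on literal keys are transliterated as the literal lists.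
def suggest_sequence (intent : String) (lane : String) : List String :=
  let intent_lower := PySem.Str.lower intent
  if ["fact", "check", "verify", "true", "false"].any (fun k => PySem.Str.isIn k intent_lower) then
    ["init_gate", "reality_search", "agi_reason", "apex_verdict", "vault_seal"]
  else if ["safe", "harm", "risk", "impact", "stakeholder"].any (fun k => PySem.Str.isIn k intent_lower) then
    ["init_gate", "asi_empathize", "asi_align", "apex_verdict", "vault_seal"]
  else if ["audit", "claims", "ai generated", "text"].any (fun k => PySem.Str.isIn k intent_lower) then
    ["init_gate", "truth_audit", "vault_seal"]
  else if ["past", "history", "previous", "query"].any (fun k => PySem.Str.isIn k intent_lower) then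
    ["vault_query"]
  else if ["quick", "fast", "simple"].any (fun k => PySem.Str.isIn k intent_lower) then
    ["trinity_forge"]
  else if lane == "FACTUAL" then
    ["init_gate", "reality_search", "agi_reason", "apex_verdict", "vault_seal"]
  else if ["CARE", "SOCIAL"].contains lane then
    ["init_gate", "asi_empathize", "asi_align", "apex_verdict", "vault_seal"]
  else
    ["init_gate", "agi_sense", "reality_search", "agi_think", "agi_reason",
     "asi_empathize", "asi_align", "apex_verdict", "vault_seal"]

-- ===== PORT B =====
def pvPrioritySeqs : List (List String) :=
  [["init_gate", "reality_search", "agi_reason", "apex_verdict", "vault_seal"],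
   ["init_gate", "asi_empathize", "asi_align", "apex_verdict", "vault_seal"],
   ["init_gate", "truth_audit", "vault_seal"],
   ["vault_query"],
   ["trinity_forge"]]

def pvFullAnalysis : List String :=
  ["init_gate", "agi_sense", "reality_search", "agi_think", "agi_reason",
   "asi_empathize", "asi_align", "apex_verdict", "vault_seal"]

def pvKeywordPriority : List (String × Nat) :=
  [("fact", 0), ("check", 0), ("verify", 0), ("true", 0), ("false", 0),
   ("safe", 1), ("harm", 1), ("risk", 1), ("impact", 1), ("stakeholder", 1),
   ("audit", 2), ("claims", 2), ("ai generated", 2), ("text", 2),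
   ("past", 3), ("history", 3), ("previous", 3), ("query", 3),
   ("quick", 4), ("fast", 4), ("simple", 4)]

-- the loop body of B: update the running minimum when this keyword occurs in t
def pvStep (t : String) (b : Nat) (kp : String × Nat) : Nat :=
  if kp.2 < b ∧ PySem.Str.isIn kp.1 t then kp.2 else b

-- B's locals t / best
def pvBest (intent : String) : Nat :=
  pvKeywordPriority.foldl (pvStep (PySem.Str.lower intent)) 5

def suggest_sequence_alt (intent : String) (lane : String) : List String :=
  if pvBest intent < 5 then
    pvPrioritySeqs.getD (pvBest intent) []
  else if lane == "FACTUAL" then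
    pvPrioritySeqs.getD 0 []
  else if ["CARE", "SOCIAL"].contains lane then
    pvPrioritySeqs.getD 1 []
  else
    pvFullAnalysis

-- ===== PRECONDITION & SPEC =====
def Spec_suggest_sequence (intent : String) (lane : String) (out : List String) : Prop := out = suggest_sequence_alt intent lane
instance (intent : String) (lane : String) (out : List String) : Decidable (Spec_suggest_sequence intent lane out) := by unfold Spec_suggest_sequence; infer_instance

-- ===== CLAIM (what is proved, stated in full; the proofs are below) =====
def Claim_equal_suggest_sequence : Prop := ∀ (intent : String) (lane : String), Dom_suggest_sequence intent lane → Spec_suggest_sequence intent lane (suggest_sequence intent lane)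

-- ===== LEMMAS AND PROOFS =====

theorem pvFold_le_init (t : String) (l : List (String × Nat)) (b : Nat) :
    l.foldl (pvStep t) b ≤ b := by
  induction l generalizing b with
  | nil => exact Nat.le_refl b
  | cons hd tl ih =>
    refine Nat.le_trans (ih (pvStep t b hd)) ?_
    unfold pvStep; split_ifs with h
    · exact Nat.le_of_lt h.1
    · exact Nat.le_refl b

theorem pvFold_le_of_mem (t : String) (l : List (String × Nat)) (b : Nat) (kw : String) (p : Nat)
    (hmem : (kw, p) ∈ l) (hin : PySem.Str.isIn kw t = true) :
    l.foldl (pvStep t) b ≤ p := by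
  induction l generalizing b with
  | nil => cases hmem
  | cons hd tl ih =>
    rcases List.mem_cons.mp hmem with heq | htl
    · subst heq
      refine Nat.le_trans (pvFold_le_init t tl _) ?_
      unfold pvStep; split_ifs with h
      · exact Nat.le_refl p
      · simp only [hin, and_true, Nat.not_lt] at h
        exact h
    · exact ih _ htl

theorem pvLe_fold (t : String) (l : List (String × Nat)) (b q : Nat)
    (hb : q ≤ b) (hall : ∀ kw p, (kw, p) ∈ l → PySem.Str.isIn kw t = true → q ≤ p) :
    q ≤ l.foldl (pvStep t) b := by
  induction l generalizing b with
  | nil => exact hb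
  | cons hd tl ih =>
    refine ih _ ?_ (fun kw p h hin => hall kw p (List.mem_cons_of_mem hd h) hin)
    unfold pvStep; split_ifs with h
    · exact hall hd.1 hd.2 (List.mem_cons_self) h.2
    · exact hb

-- ===== VERDICT (by name: the statement is the Claim_ definition above) =====
theorem suggest_sequence_spec : Claim_equal_suggest_sequence := by
  intro intent lane _
  have hble : pvBest intent ≤ 5 := pvFold_le_init _ _ _
  unfold Spec_suggest_sequence suggest_sequence suggest_sequence_alt
  dsimp only
  by_cases h1 : (["fact", "check", "verify", "true", "false"].any
      (fun k => PySem.Str.isIn k (PySem.Str.lower intent))) = true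
  · have hb : pvBest intent = 0 := by
      refine Nat.le_antisymm ?_ (Nat.zero_le _)
      simp only [List.any_eq_true, List.mem_cons, List.not_mem_nil, or_false] at h1
      obtain ⟨kw, hkw, hin⟩ := h1
      rcases hkw with rfl | rfl | rfl | rfl | rfl <;>
        exact pvFold_le_of_mem _ _ _ _ _ (by simp [pvKeywordPriority]) hin
    rw [if_pos h1, hb]
    rfl
  · rw [if_neg h1]; simp only [List.any_eq_true] at h1; push Not at h1
    by_cases h2 : (["safe", "harm", "risk", "impact", "stakeholder"].any
        (fun k => PySem.Str.isIn k (PySem.Str.lower intent))) = true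
    · have hb : pvBest intent = 1 := by
        refine Nat.le_antisymm ?_ ?_
        · simp only [List.any_eq_true, List.mem_cons, List.not_mem_nil, or_false] at h2
          obtain ⟨kw, hkw, hin⟩ := h2
          rcases hkw with rfl | rfl | rfl | rfl | rfl <;>
            exact pvFold_le_of_mem _ _ _ _ _ (by simp [pvKeywordPriority]) hin
        · refine pvLe_fold _ _ _ _ (by omega) ?_
          intro kw p hmem hin
          simp only [pvKeywordPriority, List.mem_cons, Prod.mk.injEq, List.not_mem_nil,
            or_false] at hmem
          rcases hmem with ⟨rfl, rfl⟩ | ⟨rfl, rfl⟩ | ⟨rfl, rfl⟩ | ⟨rfl, rfl⟩ | ⟨rfl, rfl⟩ |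
            ⟨rfl, rfl⟩ | ⟨rfl, rfl⟩ | ⟨rfl, rfl⟩ | ⟨rfl, rfl⟩ | ⟨rfl, rfl⟩ | ⟨rfl, rfl⟩ |
            ⟨rfl, rfl⟩ | ⟨rfl, rfl⟩ | ⟨rfl, rfl⟩ | ⟨rfl, rfl⟩ | ⟨rfl, rfl⟩ | ⟨rfl, rfl⟩ |
            ⟨rfl, rfl⟩ | ⟨rfl, rfl⟩ | ⟨rfl, rfl⟩ | ⟨rfl, rfl⟩ <;>
            first | omega | simp_all
      rw [if_pos h2, hb]
      rfl
    · rw [if_neg h2]; simp only [List.any_eq_true] at h2; push Not at h2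
      by_cases h3 : (["audit", "claims", "ai generated", "text"].any
          (fun k => PySem.Str.isIn k (PySem.Str.lower intent))) = true
      · have hb : pvBest intent = 2 := by
          refine Nat.le_antisymm ?_ ?_
          · simp only [List.any_eq_true, List.mem_cons, List.not_mem_nil, or_false] at h3
            obtain ⟨kw, hkw, hin⟩ := h3
            rcases hkw with rfl | rfl | rfl | rfl <;>
              exact pvFold_le_of_mem _ _ _ _ _ (by simp [pvKeywordPriority]) hin
          · refine pvLe_fold _ _ _ _ (by omega) ?_
            intro kw p hmem hin
            simp only [pvKeywordPriority, List.mem_cons, Prod.mk.injEq, List.not_mem_nil,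
              or_false] at hmem
            rcases hmem with ⟨rfl, rfl⟩ | ⟨rfl, rfl⟩ | ⟨rfl, rfl⟩ | ⟨rfl, rfl⟩ | ⟨rfl, rfl⟩ |
              ⟨rfl, rfl⟩ | ⟨rfl, rfl⟩ | ⟨rfl, rfl⟩ | ⟨rfl, rfl⟩ | ⟨rfl, rfl⟩ | ⟨rfl, rfl⟩ |
              ⟨rfl, rfl⟩ | ⟨rfl, rfl⟩ | ⟨rfl, rfl⟩ | ⟨rfl, rfl⟩ | ⟨rfl, rfl⟩ | ⟨rfl, rfl⟩ |
              ⟨rfl, rfl⟩ | ⟨rfl, rfl⟩ | ⟨rfl, rfl⟩ | ⟨rfl, rfl⟩ <;>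
              first | omega | simp_all
        rw [if_pos h3, hb]
        rfl
      · rw [if_neg h3]; simp only [List.any_eq_true] at h3; push Not at h3
        by_cases h4 : (["past", "history", "previous", "query"].any
            (fun k => PySem.Str.isIn k (PySem.Str.lower intent))) = true
        · have hb : pvBest intent = 3 := by
            refine Nat.le_antisymm ?_ ?_
            · simp only [List.any_eq_true, List.mem_cons, List.not_mem_nil, or_false] at h4
              obtain ⟨kw, hkw, hin⟩ := h4
              rcases hkw with rfl | rfl | rfl | rfl <;>
                exact pvFold_le_of_mem _ _ _ _ _ (by simp [pvKeywordPriority]) hin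
            · refine pvLe_fold _ _ _ _ (by omega) ?_
              intro kw p hmem hin
              simp only [pvKeywordPriority, List.mem_cons, Prod.mk.injEq, List.not_mem_nil,
                or_false] at hmem
              rcases hmem with ⟨rfl, rfl⟩ | ⟨rfl, rfl⟩ | ⟨rfl, rfl⟩ | ⟨rfl, rfl⟩ | ⟨rfl, rfl⟩ |
                ⟨rfl, rfl⟩ | ⟨rfl, rfl⟩ | ⟨rfl, rfl⟩ | ⟨rfl, rfl⟩ | ⟨rfl, rfl⟩ | ⟨rfl, rfl⟩ |
                ⟨rfl, rfl⟩ | ⟨rfl, rfl⟩ | ⟨rfl, rfl⟩ | ⟨rfl, rfl⟩ | ⟨rfl, rfl⟩ | ⟨rfl, rfl⟩ |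
                ⟨rfl, rfl⟩ | ⟨rfl, rfl⟩ | ⟨rfl, rfl⟩ | ⟨rfl, rfl⟩ <;>
                first | omega | simp_all
          rw [if_pos h4, hb]
          rfl
        · rw [if_neg h4]; simp only [List.any_eq_true] at h4; push Not at h4
          by_cases h5 : (["quick", "fast", "simple"].any
              (fun k => PySem.Str.isIn k (PySem.Str.lower intent))) = true
          · have hb : pvBest intent = 4 := by
              refine Nat.le_antisymm ?_ ?_
              · simp only [List.any_eq_true, List.mem_cons, List.not_mem_nil, or_false] at h5
                obtain ⟨kw, hkw, hin⟩ := h5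
                rcases hkw with rfl | rfl | rfl <;>
                  exact pvFold_le_of_mem _ _ _ _ _ (by simp [pvKeywordPriority]) hin
              · refine pvLe_fold _ _ _ _ (by omega) ?_
                intro kw p hmem hin
                simp only [pvKeywordPriority, List.mem_cons, Prod.mk.injEq, List.not_mem_nil,
                  or_false] at hmem
                rcases hmem with ⟨rfl, rfl⟩ | ⟨rfl, rfl⟩ | ⟨rfl, rfl⟩ | ⟨rfl, rfl⟩ | ⟨rfl, rfl⟩ |
                  ⟨rfl, rfl⟩ | ⟨rfl, rfl⟩ | ⟨rfl, rfl⟩ | ⟨rfl, rfl⟩ | ⟨rfl, rfl⟩ | ⟨rfl, rfl⟩ |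
                  ⟨rfl, rfl⟩ | ⟨rfl, rfl⟩ | ⟨rfl, rfl⟩ | ⟨rfl, rfl⟩ | ⟨rfl, rfl⟩ | ⟨rfl, rfl⟩ |
                  ⟨rfl, rfl⟩ | ⟨rfl, rfl⟩ | ⟨rfl, rfl⟩ | ⟨rfl, rfl⟩ <;>
                  first | omega | simp_all
            rw [if_pos h5, hb]
            rfl
          · rw [if_neg h5]; simp only [List.any_eq_true] at h5; push Not at h5
            have hb : pvBest intent = 5 := by
              refine Nat.le_antisymm hble ?_
              refine pvLe_fold _ _ _ _ (by omega) ?_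
              intro kw p hmem hin
              simp only [pvKeywordPriority, List.mem_cons, Prod.mk.injEq, List.not_mem_nil,
                or_false] at hmem
              rcases hmem with ⟨rfl, rfl⟩ | ⟨rfl, rfl⟩ | ⟨rfl, rfl⟩ | ⟨rfl, rfl⟩ | ⟨rfl, rfl⟩ |
                ⟨rfl, rfl⟩ | ⟨rfl, rfl⟩ | ⟨rfl, rfl⟩ | ⟨rfl, rfl⟩ | ⟨rfl, rfl⟩ | ⟨rfl, rfl⟩ |
                ⟨rfl, rfl⟩ | ⟨rfl, rfl⟩ | ⟨rfl, rfl⟩ | ⟨rfl, rfl⟩ | ⟨rfl, rfl⟩ | ⟨rfl, rfl⟩ |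
                ⟨rfl, rfl⟩ | ⟨rfl, rfl⟩ | ⟨rfl, rfl⟩ | ⟨rfl, rfl⟩ <;>
                simp_all
            rw [hb]
            simp only [Nat.lt_irrefl, if_false]
            split_ifs <;> rfl
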